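-- pv_equiv track=rewrite | github.com/SkillUpTech/Dge-Recommendation-Plugin | views.py | balance_subjects
-- ===== SOURCE A (Python) =====
-- from collections import defaultdict
--
-- def balance_subjects(courses, per_subject=3, total_limit=10):
--     """
--     Group by subject and limit 1–3 per subject.
--     """
--     grouped = defaultdict(list)
--     for c in courses:
--         grouped[c.get("subject", "Unknown")].append(c)
--
--     final = []
--     for subject in sorted(grouped.keys()):
--         final.extend(grouped[subject][:per_subject])
--         if len(final) >= total_limit:
--             break
--
--     return final[:total_limit]
-- ===== SOURCE B (Python) =====
-- def balance_subjects(courses, per_subject=3, total_limit=10):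
--     """
--     Sort once by subject (stable), then walk contiguous runs of equal
--     subject; no dict/grouping map is built.
--     """
--     ordered = sorted(courses, key=lambda c: c.get("subject", "Unknown"))
--     final = []
--     rest = ordered
--     while rest:
--         key = rest[0].get("subject", "Unknown")
--         run = 1
--         while run < len(rest) and rest[run].get("subject", "Unknown") == key:
--             run += 1
--         final.extend(rest[:run][:per_subject])
--         if len(final) >= total_limit:
--             break
--         rest = rest[run:]
--     return final[:total_limit]
-- ===== Notes on version B (the rewrite author's own statement) =====
-- stated objective: alternative
-- what changed: Replaces the defaultdict-of-lists grouping with a single stable sort by subject followed by one walk over contiguous equal-subject runs (a sort-then-scan groupby with no mapping maintained).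
import Mathlib
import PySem

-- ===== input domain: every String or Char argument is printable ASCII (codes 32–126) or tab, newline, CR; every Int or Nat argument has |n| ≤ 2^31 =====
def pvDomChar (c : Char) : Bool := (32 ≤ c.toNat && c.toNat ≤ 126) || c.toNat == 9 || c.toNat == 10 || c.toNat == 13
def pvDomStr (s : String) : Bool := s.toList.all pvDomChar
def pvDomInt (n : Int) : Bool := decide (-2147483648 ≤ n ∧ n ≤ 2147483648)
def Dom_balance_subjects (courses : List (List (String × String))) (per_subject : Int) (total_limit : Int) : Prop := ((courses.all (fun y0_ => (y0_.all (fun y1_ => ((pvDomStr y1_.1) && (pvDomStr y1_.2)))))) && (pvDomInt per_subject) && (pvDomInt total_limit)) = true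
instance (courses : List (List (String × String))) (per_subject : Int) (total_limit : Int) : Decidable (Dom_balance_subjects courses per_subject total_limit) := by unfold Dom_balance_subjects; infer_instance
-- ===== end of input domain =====

-- B replaces the defaultdict grouping by one stable sort on subject followed by a single walk over contiguous equal-subject runs (alternative algorithm, no mapping maintained).


-- shared port of the Python expression  c.get("subject", "Unknown")
def pvSubj (c : List (String × String)) : String :=
  (PySem.Dict.mk c).getD "subject" "Unknown"

-- ===== PORT A =====
-- for subject in sorted(grouped.keys()): final.extend(grouped[subject][:per_subject]); if len(final) >= total_limit: break
def pvLoopA (grouped : PySem.Dict String (List (List (String × String))))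
    (per_subject total_limit : Int)
    (subjects : List String) (final : List (List (String × String))) :
    List (List (String × String)) :=
  match subjects with
  | [] => final
  | s :: rest =>
      let final' := final ++ PySem.List.slice (grouped.getD s []) none (some per_subject)
      if total_limit ≤ (final'.length : Int) then final'
      else pvLoopA grouped per_subject total_limit rest final'

def balance_subjects (courses : List (List (String × String))) (per_subject : Int) (total_limit : Int) : List (List (String × String)) :=
  -- grouped = defaultdict(list); for c in courses: grouped[c.get("subject","Unknown")].append(c)
  let grouped : PySem.Dict String (List (List (String × String))) :=
    courses.foldl (fun d c => d.modify (pvSubj c) [] (· ++ [c])) PySem.Dict.empty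
  let final := pvLoopA grouped per_subject total_limit
    (PySem.List.sorted grouped.keys (fun x => x) false) []
  PySem.List.slice final none (some total_limit)

-- ===== PORT B =====
-- outer while over the remaining suffix 'rest'; the inner index loop computes 'run',
-- the length of the maximal prefix of 'rest' with the head's subject, so
-- rest[:run] = c :: takeWhile (same subject) and rest[run:] = dropWhile (same subject)
def pvRuns (per_subject total_limit : Int) :
    List (List (String × String)) → List (List (String × String)) → List (List (String × String))
  | [], final => final
  | c :: t, final =>
      let grp := c :: t.takeWhile (fun d => pvSubj d == pvSubj c)
      let final' := final ++ PySem.List.slice grp none (some per_subject)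
      if total_limit ≤ (final'.length : Int) then final'
      else pvRuns per_subject total_limit (t.dropWhile (fun d => pvSubj d == pvSubj c)) final'
termination_by l _ => l.length
decreasing_by
  simp only [List.length_cons]
  exact Nat.lt_succ_of_le (List.length_dropWhile_le _ _)

def balance_subjects_alt (courses : List (List (String × String))) (per_subject : Int) (total_limit : Int) : List (List (String × String)) :=
  -- ordered = sorted(courses, key=lambda c: c.get("subject", "Unknown"))
  let ordered := PySem.List.sorted courses pvSubj false
  let final := pvRuns per_subject total_limit ordered []
  PySem.List.slice final none (some total_limit)

-- ===== PRECONDITION & SPEC =====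
def Spec_balance_subjects (courses : List (List (String × String))) (per_subject : Int) (total_limit : Int) (out : List (List (String × String))) : Prop := out = balance_subjects_alt courses per_subject total_limit
instance (courses : List (List (String × String))) (per_subject : Int) (total_limit : Int) (out : List (List (String × String))) : Decidable (Spec_balance_subjects courses per_subject total_limit out) := by unfold Spec_balance_subjects; infer_instance

-- ===== CLAIM (what is proved, stated in full; the proofs are below) =====
def Claim_equal_balance_subjects : Prop := ∀ (courses : List (List (String × String))) (per_subject : Int) (total_limit : Int), Dom_balance_subjects courses per_subject total_limit → Spec_balance_subjects courses per_subject total_limit (balance_subjects courses per_subject total_limit)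

-- ===== LEMMAS AND PROOFS =====

-- A's grouped[s] is the filter of the input by exact subject.
theorem grouped_getD (courses : List (List (String × String))) (s : String) :
    (courses.foldl (fun d c => d.modify (pvSubj c) [] (· ++ [c]))
        (PySem.Dict.empty : PySem.Dict String (List (List (String × String))))).getD s []
      = courses.filter (fun c => pvSubj c == s) := by
  have h := PySem.Dict.getD_foldl_modify_append
      (l := courses.map (fun c => (pvSubj c, c)))
      (d := (PySem.Dict.empty : PySem.Dict String (List (List (String × String))))) (c := s)
  rw [List.foldl_map] at h
  simp only [PySem.Dict.getD_empty, List.nil_append] at h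
  rw [h, List.filter_map, List.map_map]
  simp [Function.comp_def]

-- A's grouped.keys is the first-occurrence set of subjects.
theorem grouped_keys (courses : List (List (String × String))) :
    (courses.foldl (fun d c => d.modify (pvSubj c) [] (· ++ [c]))
        (PySem.Dict.empty : PySem.Dict String (List (List (String × String))))).keys
      = PySem.Set.ofList (courses.map pvSubj) := by
  rw [PySem.Dict.keys_foldl_modify_key (key := pvSubj)]
  simp [PySem.Dict.keys_empty, PySem.Set.update, PySem.Set.ofList_eq_foldl]

-- stability of the insertion sort w.r.t. filtering by an exact key value --

theorem insertBy_pairwise (x : List (String × String)) (ys : List (List (String × String)))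
    (h : ys.Pairwise (fun a b => pvSubj a ≤ pvSubj b)) :
    (PySem.List.insertBy (fun a b => decide (pvSubj a < pvSubj b)) x ys).Pairwise
      (fun a b => pvSubj a ≤ pvSubj b) := by
  induction ys with
  | nil => simp [PySem.List.insertBy]
  | cons y ys ih =>
      simp only [PySem.List.insertBy]
      rcases List.pairwise_cons.mp h with ⟨hy, ht⟩
      by_cases hlt : pvSubj x < pvSubj y
      · simp only [hlt, decide_true, if_true]
        refine List.pairwise_cons.mpr ⟨?_, h⟩
        intro b hb
        rcases List.mem_cons.mp hb with rfl | hb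
        · exact le_of_lt hlt
        · exact le_of_lt (lt_of_lt_of_le hlt (hy b hb))
      · simp only [hlt, decide_false]
        rw [if_neg (by simp)]
        refine List.pairwise_cons.mpr ⟨?_, ih ht⟩
        intro b hb
        rcases (PySem.List.mem_insertBy _ _ _ _).mp hb with rfl | hb
        · exact le_of_not_gt hlt
        · exact hy b hb

theorem filter_insertBy (s : String) (x : List (String × String)) (ys : List (List (String × String)))
    (h : ys.Pairwise (fun a b => pvSubj a ≤ pvSubj b)) :
    (PySem.List.insertBy (fun a b => decide (pvSubj a < pvSubj b)) x ys).filter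
        (fun c => pvSubj c == s)
      = ys.filter (fun c => pvSubj c == s) ++ (if pvSubj x == s then [x] else []) := by
  induction ys with
  | nil =>
      by_cases hx : pvSubj x == s <;>
        simp [PySem.List.insertBy, List.filter, hx]
  | cons y ys ih =>
      simp only [PySem.List.insertBy]
      rcases List.pairwise_cons.mp h with ⟨hy, ht⟩
      by_cases hlt : pvSubj x < pvSubj y
      · simp only [hlt, decide_true, if_true]
        by_cases hx : pvSubj x == s
        · -- every element of y :: ys has key > s, so its filter is empty
          have hemp : (y :: ys).filter (fun c => pvSubj c == s) = [] := by
            rw [List.filter_eq_nil_iff]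
            intro b hb
            have hgt : pvSubj x < pvSubj b := by
              rcases List.mem_cons.mp hb with rfl | hb
              · exact hlt
              · exact lt_of_lt_of_le hlt (hy b hb)
            simp only [beq_iff_eq]
            intro hbs
            rw [← (beq_iff_eq.mp hx)] at hbs
            exact absurd hbs (ne_of_gt hgt)
          rw [List.filter_cons_of_pos (by simpa using hx), hemp]
          simp [hx]
        · have hxs : pvSubj x ≠ s := by simpa using hx
          rw [List.filter_cons_of_neg (by simpa using hx)]
          simp [hx]
      · simp only [hlt, decide_false]
        rw [if_neg (by simp)]
        by_cases hyeq : pvSubj y == s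
        · rw [List.filter_cons_of_pos (by simpa using hyeq),
              List.filter_cons_of_pos (by simpa using hyeq), ih ht]
          simp
        · rw [List.filter_cons_of_neg (by simpa using hyeq),
              List.filter_cons_of_neg (by simpa using hyeq), ih ht]

theorem filter_foldl_insertBy (s : String) (xs : List (List (String × String))) :
    ∀ acc, acc.Pairwise (fun a b => pvSubj a ≤ pvSubj b) →
    (xs.foldl (fun acc x => PySem.List.insertBy (fun a b => decide (pvSubj a < pvSubj b)) x acc) acc).filter
        (fun c => pvSubj c == s)
      = acc.filter (fun c => pvSubj c == s) ++ xs.filter (fun c => pvSubj c == s) := by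
  induction xs with
  | nil => intro acc _; simp
  | cons x xs ih =>
      intro acc hacc
      rw [List.foldl_cons, ih _ (insertBy_pairwise x acc hacc), filter_insertBy s x acc hacc]
      by_cases hx : pvSubj x == s
      · rw [List.filter_cons_of_pos (by simpa using hx)]; simp [hx]
      · rw [List.filter_cons_of_neg (by simpa using hx)]; simp [hx]

-- the stable sort does not change the filter by an exact key value
theorem filter_sorted (s : String) (courses : List (List (String × String))) :
    (PySem.List.sorted courses pvSubj false).filter (fun c => pvSubj c == s)
      = courses.filter (fun c => pvSubj c == s) := by
  rw [PySem.List.sorted_eq_foldl_insertBy, filter_foldl_insertBy s courses [] (by simp)]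
  simp

-- dedup facts --

theorem foldl_add_cons (k : String) (zs : List String) (hk : ∀ x ∈ zs, x ≠ k) :
    ∀ s : List String, zs.foldl PySem.Set.add (k :: s) = k :: zs.foldl PySem.Set.add s := by
  induction zs with
  | nil => intro s; rfl
  | cons z zs ih =>
      intro s
      have hz : z ≠ k := hk z (by simp)
      have : PySem.Set.add (k :: s) z = k :: PySem.Set.add s z := by
        have hzk : (z == k) = false := beq_eq_false_iff_ne.mpr hz
        simp only [PySem.Set.add, PySem.Set.contains, List.contains_cons, hzk, Bool.false_or]
        split <;> rfl
      rw [List.foldl_cons, this, List.foldl_cons,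
        ih (fun x hx => hk x (by simp [hx]))]

theorem dedup_run (k : String) (pre zs : List String)
    (hpre : ∀ x ∈ pre, x = k) (hzs : ∀ x ∈ zs, x ≠ k) :
    PySem.List.dedup (k :: (pre ++ zs)) = k :: PySem.List.dedup zs := by
  simp only [PySem.List.dedup, PySem.Set.ofList, List.foldl_cons, List.foldl_append]
  have h1 : PySem.Set.add PySem.Set.empty k = [k] := rfl
  rw [h1]
  have h2 : pre.foldl PySem.Set.add [k] = [k] := by
    induction pre with
    | nil => rfl
    | cons p ps ihp =>
        have hp : p = k := hpre p (by simp)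
        have : PySem.Set.add [k] p = [k] := by
          simp [PySem.Set.add, PySem.Set.contains, hp]
        rw [List.foldl_cons, this, ihp (fun x hx => hpre x (by simp [hx]))]
  rw [h2]
  exact foldl_add_cons k zs hzs []

theorem foldl_add_sublist (xs : List String) :
    ∀ s pre : List String, s.Sublist pre → (xs.foldl PySem.Set.add s).Sublist (pre ++ xs) := by
  induction xs with
  | nil => intro s pre h; simpa using h
  | cons x xs ih =>
      intro s pre h
      rw [List.foldl_cons]
      have hstep : (PySem.Set.add s x).Sublist (pre ++ [x]) := by
        by_cases hc : PySem.Set.contains s x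
        · simp only [PySem.Set.add, hc, if_true]
          exact h.trans (List.sublist_append_left pre [x])
        · simp only [PySem.Set.add, hc]
          exact List.Sublist.append h (List.Sublist.refl [x])
      have := ih (PySem.Set.add s x) (pre ++ [x]) hstep
      simpa [List.append_assoc] using this

theorem dedup_sublist (xs : List String) : (PySem.List.dedup xs).Sublist xs := by
  simpa using foldl_add_sublist xs [] [] (List.Sublist.refl [])

theorem dedup_pairwise_lt (xs : List String) (h : xs.Pairwise (· ≤ ·)) :
    (PySem.List.dedup xs).Pairwise (· < ·) := by
  have hle : (PySem.List.dedup xs).Pairwise (· ≤ ·) := h.sublist (dedup_sublist xs)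
  have hne : (PySem.List.dedup xs).Pairwise (· ≠ ·) := PySem.Set.nodup_ofList xs
  exact (hle.and hne).imp (fun h => lt_of_le_of_ne h.1 h.2)

-- dropWhile of a key-sorted list: every remaining element has a strictly larger key
theorem dropWhile_keys_gt (c : List (String × String)) (t : List (List (String × String)))
    (h : (c :: t).Pairwise (fun a b => pvSubj a ≤ pvSubj b)) :
    ∀ y ∈ t.dropWhile (fun d => pvSubj d == pvSubj c), pvSubj c < pvSubj y := by
  rcases List.pairwise_cons.mp h with ⟨hc, ht⟩
  intro y hy
  cases hd : t.dropWhile (fun d => pvSubj d == pvSubj c) with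
  | nil => rw [hd] at hy; simp at hy
  | cons y0 ys =>
      have hy0 : ¬ (pvSubj y0 == pvSubj c) := by
        have := List.head?_dropWhile_not (p := fun d => pvSubj d == pvSubj c) (l := t)
        rw [hd] at this
        simpa using this
      have hy0mem : y0 ∈ t := (List.dropWhile_sublist _).subset (by rw [hd]; simp)
      have hy0gt : pvSubj c < pvSubj y0 :=
        lt_of_le_of_ne (hc y0 hy0mem) (fun e => hy0 (by simp [e.symm]))
      rw [hd] at hy
      rcases List.mem_cons.mp hy with rfl | hy
      · exact hy0gt
      · have hpw : (y0 :: ys).Pairwise (fun a b => pvSubj a ≤ pvSubj b) := by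
          have := ht.sublist (List.dropWhile_sublist (p := fun d => pvSubj d == pvSubj c))
          rwa [hd] at this
        exact lt_of_lt_of_le hy0gt ((List.pairwise_cons.mp hpw).1 y hy)

-- main loop correspondence: A's loop over the sorted distinct keys, fed the filters,
-- equals B's walk over the runs of the key-sorted list
theorem runs_eq (per_subject total_limit : Int)
    (g : PySem.Dict String (List (List (String × String)))) :
    ∀ n (l : List (List (String × String))), l.length ≤ n →
    l.Pairwise (fun a b => pvSubj a ≤ pvSubj b) →
    (∀ k ∈ PySem.List.dedup (l.map pvSubj), g.getD k [] = l.filter (fun c => pvSubj c == k)) →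
    ∀ final, pvLoopA g per_subject total_limit (PySem.List.dedup (l.map pvSubj)) final
      = pvRuns per_subject total_limit l final := by
  intro n
  induction n with
  | zero =>
      intro l hl _ _ final
      have : l = [] := List.eq_nil_of_length_eq_zero (Nat.le_zero.mp hl)
      subst this
      rw [pvRuns]
      rfl
  | succ n ih =>
      intro l hl hsort hg final
      cases l with
      | nil => rw [pvRuns]; rfl
      | cons c t =>
          have hgt := dropWhile_keys_gt c t hsort
          have hdropfail : ∀ y ∈ t.dropWhile (fun d => pvSubj d == pvSubj c),
              ¬ ((fun d => pvSubj d == pvSubj c) y = true) := by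
            intro y hy
            simp only [beq_iff_eq]
            exact fun e => absurd e.symm (ne_of_lt (hgt y hy))
          have hdropne : ∀ x ∈ (t.dropWhile (fun d => pvSubj d == pvSubj c)).map pvSubj,
              x ≠ pvSubj c := by
            intro x hx
            rcases List.mem_map.mp hx with ⟨y, hy, rfl⟩
            exact ne_of_gt (hgt y hy)
          -- the distinct keys of c :: t are the head key followed by those of the remainder
          have hkeys : PySem.List.dedup ((c :: t).map pvSubj)
              = pvSubj c
                :: PySem.List.dedup ((t.dropWhile (fun d => pvSubj d == pvSubj c)).map pvSubj) := by
            have hmap : (c :: t).map pvSubj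
                = pvSubj c :: ((t.takeWhile (fun d => pvSubj d == pvSubj c)).map pvSubj
                    ++ (t.dropWhile (fun d => pvSubj d == pvSubj c)).map pvSubj) := by
              rw [← List.map_append, List.takeWhile_append_dropWhile]
              rfl
            rw [hmap]
            refine dedup_run _ _ _ ?_ hdropne
            intro x hx
            rcases List.mem_map.mp hx with ⟨y, hy, rfl⟩
            exact beq_iff_eq.mp (List.mem_takeWhile_imp (p := fun d => pvSubj d == pvSubj c) hy)
          -- the filter by the head key is the head run
          have hfilter : (c :: t).filter (fun d => pvSubj d == pvSubj c)
              = c :: t.takeWhile (fun d => pvSubj d == pvSubj c) := by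
            rw [List.filter_cons_of_pos (by simp)]
            congr 1
            conv_lhs => rw [← List.takeWhile_append_dropWhile
              (p := fun d => pvSubj d == pvSubj c) (l := t)]
            rw [List.filter_append,
              List.filter_eq_self.mpr (fun a ha => List.mem_takeWhile_imp (p := fun d => pvSubj d == pvSubj c) ha),
              List.filter_eq_nil_iff.mpr (fun a ha => by simpa using hdropfail a ha),
              List.append_nil]
          -- any other key filters identically through the remainder
          have hother : ∀ k, k ≠ pvSubj c →
              (c :: t).filter (fun d => pvSubj d == k)
                = (t.dropWhile (fun d => pvSubj d == pvSubj c)).filter (fun d => pvSubj d == k) := by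
            intro k hk
            rw [List.filter_cons_of_neg (by simpa using fun e => hk e.symm)]
            conv_lhs => rw [← List.takeWhile_append_dropWhile
              (p := fun d => pvSubj d == pvSubj c) (l := t)]
            rw [List.filter_append,
              List.filter_eq_nil_iff.mpr (fun a ha => by
                have : pvSubj a = pvSubj c := beq_iff_eq.mp (List.mem_takeWhile_imp (p := fun d => pvSubj d == pvSubj c) ha)
                simpa [this] using fun e => hk e.symm),
              List.nil_append]
          rw [hkeys, pvRuns]
          simp only [pvLoopA]
          have hgc : g.getD (pvSubj c) [] = c :: t.takeWhile (fun d => pvSubj d == pvSubj c) := by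
            rw [hg (pvSubj c) (by rw [hkeys]; exact List.mem_cons_self), hfilter]
          rw [hgc]
          split
          · rfl
          · -- recurse on the remainder
            refine ih (t.dropWhile (fun d => pvSubj d == pvSubj c))
              (le_trans (List.length_dropWhile_le _ _) (Nat.le_of_succ_le_succ (by simpa using hl)))
              ((List.pairwise_cons.mp hsort).2.sublist (List.dropWhile_sublist _)) ?_ _
            intro k hk
            have hkne : k ≠ pvSubj c := by
              rcases List.mem_map.mp ((PySem.List.mem_dedup _ _).mp hk) with ⟨y, hy, rfl⟩
              exact ne_of_gt (hgt y hy)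
            rw [hg k (by rw [hkeys]; exact List.mem_cons_of_mem _ hk), hother k hkne]

-- ===== VERDICT (by name: the statement is the Claim_ definition above) =====
theorem balance_subjects_spec : Claim_equal_balance_subjects := by
  intro courses per_subject total_limit _
  unfold Spec_balance_subjects
  simp only [balance_subjects, balance_subjects_alt]
  rw [grouped_keys]
  have hkeys : PySem.List.sorted (PySem.Set.ofList (courses.map pvSubj)) (fun x => x) false
      = PySem.List.dedup ((PySem.List.sorted courses pvSubj false).map pvSubj) := by
    refine PySem.List.sorted_eq_of_perm_of_pairwise_lt _ _ _ ?_ ?_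
    · refine (List.perm_ext_iff_of_nodup (PySem.Set.nodup_ofList _) (PySem.Set.nodup_ofList _)).mpr ?_
      intro a
      rw [PySem.Set.mem_ofList, PySem.Set.mem_ofList]
      constructor
      · intro ha
        rcases List.mem_map.mp ha with ⟨y, hy, rfl⟩
        exact List.mem_map_of_mem ((PySem.List.mem_sorted _ _ _ _).mp hy)
      · intro ha
        rcases List.mem_map.mp ha with ⟨y, hy, rfl⟩
        exact List.mem_map_of_mem ((PySem.List.mem_sorted _ _ _ _).mpr hy)
    · exact dedup_pairwise_lt _ (PySem.List.sorted_map_key_pairwise _ _)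
  rw [hkeys]
  congr 1
  refine runs_eq per_subject total_limit _
    (PySem.List.sorted courses pvSubj false).length _ le_rfl
    (PySem.List.sorted_pairwise _ _) ?_ []
  intro k _
  rw [grouped_getD, filter_sorted]
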